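-- pv_equiv track=rewrite | github.com/lithp/practice | chessboard.py | decide_n_by_n_board_alt
-- ===== SOURCE A (Python) =====
-- from typing import List, NamedTuple, Optional
--
-- def head_count_is_even(items: List[bool]) -> bool:
--     # sum(List[bool]) treats True as 1, and False as 0
--     return sum(items) % 2 == 0
--
-- def decide_n_by_n_board_alt(board: List[bool]) -> int:
--     """
--     Previously we iterated over each coin and added their contributions to bits
--     Another way would be to iterate over the bits and find the coins which contribute to
--       them
--     """
--     result = 0
--     n = (len(board) - 1).bit_length()
--
--     for bit in range(n):
--         matching_indices = [
--             i for i in range(len(board))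
--             if (i & (2**bit)) != 0
--         ]
--         coins = [board[i] for i in matching_indices]
--         is_even = head_count_is_even(coins)
--
--         if is_even:
--             result += 2**bit
--
--     return result
-- ===== SOURCE B (Python) =====
-- from typing import List
--
--
-- def decide_n_by_n_board_alt(board: List[bool]) -> int:
--     # XOR together the indices of all heads; a result bit is set exactly when
--     # that bit of the XOR is clear (even head-count), so complement against the
--     # n-bit all-ones mask.  One pass, O(len) instead of O(len * log len).
--     n = (len(board) - 1).bit_length()
--     x = 0
--     for i, heads in enumerate(board):
--         if heads:
--             x ^= i
--     return ((1 << n) - 1) ^ x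
-- ===== Notes on version B (the rewrite author's own statement) =====
-- stated objective: faster
-- what changed: Instead of rescanning the whole board once per result bit (building index/coin lists and summing them), B XORs the indices of all heads in a single pass and returns the XOR complemented against the n-bit all-ones mask.
import Mathlib
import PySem

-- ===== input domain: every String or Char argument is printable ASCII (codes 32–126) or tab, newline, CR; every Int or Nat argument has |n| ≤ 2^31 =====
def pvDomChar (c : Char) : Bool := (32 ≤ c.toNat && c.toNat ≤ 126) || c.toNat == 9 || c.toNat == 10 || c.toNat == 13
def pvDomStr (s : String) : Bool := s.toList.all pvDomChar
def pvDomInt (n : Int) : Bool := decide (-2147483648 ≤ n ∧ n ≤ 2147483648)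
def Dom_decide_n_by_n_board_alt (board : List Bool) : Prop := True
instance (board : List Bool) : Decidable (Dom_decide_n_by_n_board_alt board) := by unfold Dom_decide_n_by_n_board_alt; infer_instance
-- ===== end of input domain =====

-- B replaces A's per-bit rescan of the board by a single XOR pass over the head
-- indices, complemented against the n-bit all-ones mask (alternative algorithm).

-- ===== PORT A =====
def head_count_is_even (items : List Bool) : Bool :=
  -- sum(items) % 2 == 0
  PySem.Int.mod (items.foldl (fun s b => s + (if b then 1 else 0)) 0) 2 == 0

def decide_n_by_n_board_alt (board : List Bool) : Int :=
  let n := PySem.Int.bitLength ((board.length : Int) - 1)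
  (List.range n).foldl (fun result bit =>
    let matching := (PySem.List.pyRange 0 (board.length : Int) 1).filter
        (fun i => PySem.Int.band i ((2 : Int) ^ bit) != 0)
    -- board[i]: i comes from range(len(board)), hence always in range, so pyGetD is exact
    let coins := matching.map (fun i => PySem.List.pyGetD board i false)
    let is_even := head_count_is_even coins
    if is_even then result + (2 : Int) ^ bit else result) 0

-- ===== PORT B =====
def decide_n_by_n_board_alt_alt (board : List Bool) : Int :=
  let n := PySem.Int.bitLength ((board.length : Int) - 1)
  let x := (PySem.List.enumerate board).foldl
    (fun acc p => if p.2 then PySem.Int.bxor acc p.1 else acc) 0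
  PySem.Int.bxor ((2 : Int) ^ n - 1) x   -- ((1 << n) - 1) ^ x

-- ===== PRECONDITION & SPEC =====
def Spec_decide_n_by_n_board_alt (board : List Bool) (out : Int) : Prop := out = decide_n_by_n_board_alt_alt board
instance (board : List Bool) (out : Int) : Decidable (Spec_decide_n_by_n_board_alt board out) := by unfold Spec_decide_n_by_n_board_alt; infer_instance

-- ===== CLAIM (what is proved, stated in full; the proofs are below) =====
def Claim_equal_decide_n_by_n_board_alt : Prop := ∀ (board : List Bool), Dom_decide_n_by_n_board_alt board → Spec_decide_n_by_n_board_alt board (decide_n_by_n_board_alt board)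

-- ===== LEMMAS AND PROOFS =====

-- whether the number of heads at indices with bit `bit` set is odd
def pvOddBit (board : List Bool) (bit : Nat) : Bool :=
  decide ((List.range board.length).countP
    (fun i => board.getD i false && i.testBit bit) % 2 = 1)

-- Nat shadow of A's bit-accumulating fold
def pvNatA (board : List Bool) (n : Nat) : Nat :=
  (List.range n).foldl (fun r bit => if !pvOddBit board bit then r + 2 ^ bit else r) 0

-- Nat shadow of B's XOR pass
def pvNatX (board : List Bool) : Nat :=
  (List.range board.length).foldl (fun a i => if board.getD i false then a ^^^ i else a) 0

lemma pv_sum_count (l : List Bool) (s : Int) :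
    l.foldl (fun s b => s + (if b then 1 else 0)) s = s + (l.count true : Nat) := by
  induction l generalizing s with
  | nil => simp
  | cons b t ih =>
    cases b
    · simp [ih]
    · simp only [List.foldl_cons, if_pos, ih, List.count_cons]
      simp
      ring

lemma pv_hcie (l : List Bool) : head_count_is_even l = !decide (l.count true % 2 = 1) := by
  unfold head_count_is_even
  rw [pv_sum_count, zero_add, show (2 : Int) = ((2 : Nat) : Int) from rfl,
    PySem.Int.mod_natCast]
  rcases Nat.mod_two_eq_zero_or_one (l.count true) with h | h <;> simp [h]

lemma pv_parity_flip (c : Nat) : decide ((c + 1) % 2 = 1) = !decide (c % 2 = 1) := by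
  rcases Nat.mod_two_eq_zero_or_one c with h | h <;> simp [Nat.add_mod, h]

lemma pv_xorfold_testBit (l : List Nat) (cond : Nat → Bool) (acc : Nat) (j : Nat) :
    ((l.foldl (fun a i => if cond i then a ^^^ i else a) acc).testBit j)
      = (acc.testBit j ^^ decide (l.countP (fun i => cond i && i.testBit j) % 2 = 1)) := by
  induction l generalizing acc with
  | nil => simp
  | cons i t ih =>
    simp only [List.foldl_cons, List.countP_cons]
    cases h1 : cond i
    · simp [ih]
    · cases h2 : i.testBit j
      · simp [h2, ih]
      · simp only [if_pos, ih, Nat.testBit_xor, h2]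
        simp [pv_parity_flip]

lemma pv_natX_testBit (board : List Bool) (j : Nat) :
    (pvNatX board).testBit j = pvOddBit board j := by
  unfold pvNatX pvOddBit
  rw [pv_xorfold_testBit]
  simp

lemma pv_natA_lt (board : List Bool) (n : Nat) : pvNatA board n < 2 ^ n := by
  induction n with
  | zero => simp [pvNatA]
  | succ n ih =>
    unfold pvNatA at *
    rw [List.range_succ, List.foldl_append, List.foldl_cons, List.foldl_nil]
    have h2 : (2:Nat) ^ (n+1) = 2 ^ n + 2 ^ n := by ring
    split <;> omega

lemma pv_natA_testBit (board : List Bool) (n j : Nat) :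
    (pvNatA board n).testBit j = (decide (j < n) && !pvOddBit board j) := by
  induction n with
  | zero => simp [pvNatA]
  | succ n ih =>
    have hb := pv_natA_lt board n
    unfold pvNatA at *
    rw [List.range_succ, List.foldl_append, List.foldl_cons, List.foldl_nil]
    rcases lt_trichotomy j n with hj | hj | hj
    · split
      · rw [add_comm, Nat.testBit_two_pow_add_gt hj, ih]
        simp [hj, Nat.lt_succ_of_lt hj]
      · rw [ih]
        simp [hj, Nat.lt_succ_of_lt hj]
    · subst hj
      have hf : (List.foldl (fun r bit => if (!pvOddBit board bit) = true then r + 2 ^ bit else r) 0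
          (List.range j)).testBit j = false := Nat.testBit_eq_false_of_lt hb
      split
      · rename_i h
        rw [add_comm, Nat.testBit_two_pow_add_eq, hf]
        simp_all
      · rename_i h
        rw [hf]
        simp only [Bool.not_eq_true] at h
        simp [h]
    · have hlt : ∀ m, m < 2 ^ (n+1) → m.testBit j = false := by
        intro m hm
        exact Nat.testBit_eq_false_of_lt
          (lt_of_lt_of_le hm (Nat.pow_le_pow_right (by norm_num) hj))
      have hns : ¬ j < n + 1 := by omega
      split
      · rw [hlt _ (by have := pv_natA_lt board (n+1)
                      unfold pvNatA at this
                      rw [List.range_succ, List.foldl_append, List.foldl_cons,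
                        List.foldl_nil] at this
                      split at this <;> omega)]
        simp [hns]
      · rw [hlt _ (lt_trans hb (Nat.pow_lt_pow_right (by norm_num) (Nat.lt_succ_self n)))]
        simp [hns]

lemma pv_oddBit_high (board : List Bool) (j : Nat) (h : board.length ≤ 2 ^ j) :
    pvOddBit board j = false := by
  unfold pvOddBit
  have : (List.range board.length).countP
      (fun i => board.getD i false && i.testBit j) = 0 := by
    rw [List.countP_eq_zero]
    intro i hi
    have : i.testBit j = false :=
      Nat.testBit_eq_false_of_lt (lt_of_lt_of_le (List.mem_range.mp hi) h)
    simp [this]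
  rw [this]
  simp

lemma pv_bitLength_lt (m : Nat) : m < 2 ^ PySem.Int.bitLength (m : Int) := by
  induction m using Nat.strong_induction_on with
  | _ m ih =>
    rcases Nat.eq_zero_or_pos m with h | h
    · subst h; decide
    · rw [PySem.Int.bitLength_natCast h]
      have := ih (m / 2) (by omega)
      rw [pow_succ]
      omega

lemma pv_len_le (board : List Bool) :
    board.length ≤ 2 ^ PySem.Int.bitLength ((board.length : Int) - 1) := by
  rcases Nat.eq_zero_or_pos board.length with h | h
  · simp [h]
  · rw [show ((board.length : Int) - 1) = ((board.length - 1 : Nat) : Int) by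
      push_cast [h]; omega]
    have := pv_bitLength_lt (board.length - 1)
    omega

lemma pv_intFold (bits : List Nat) (c : Nat → Bool) (s : Nat) :
    bits.foldl (fun r bit => if c bit then r + (2 : Int) ^ bit else r) (s : Int)
      = ((bits.foldl (fun r bit => if c bit then r + 2 ^ bit else r) s : Nat) : Int) := by
  induction bits generalizing s with
  | nil => simp
  | cons b t ih =>
    simp only [List.foldl_cons]
    cases h : c b
    · simp [ih]
    · simp only [if_pos]
      rw [show (s : Int) + (2:Int) ^ b = ((s + 2 ^ b : Nat) : Int) by push_cast; ring, ih]

lemma pv_intXFold (l : List Nat) (g : Nat → Bool) (s : Nat) :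
    l.foldl (fun acc k => if g k then PySem.Int.bxor acc (k : Int) else acc) (s : Int)
      = ((l.foldl (fun a k => if g k then a ^^^ k else a) s : Nat) : Int) := by
  induction l generalizing s with
  | nil => simp
  | cons k t ih =>
    simp only [List.foldl_cons]
    cases h : g k
    · simp [ih]
    · simp only [if_pos]
      rw [PySem.Int.bxor_natCast, ih]

lemma pv_band_pow (k bit : Nat) :
    (PySem.Int.band (k : Int) ((2 : Int) ^ bit) != 0) = k.testBit bit := by
  rw [show ((2 : Int) ^ bit) = ((2 ^ bit : Nat) : Int) by push_cast; ring,
    PySem.Int.band_natCast]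
  cases h : k.testBit bit <;> simp [Nat.and_two_pow, h]

lemma pv_A_eq (board : List Bool) :
    decide_n_by_n_board_alt board
      = ((pvNatA board (PySem.Int.bitLength ((board.length : Int) - 1))) : Int) := by
  unfold decide_n_by_n_board_alt pvNatA
  rw [PySem.List.foldl_congr_mem _ _
    (fun (r : Int) bit => if !pvOddBit board bit then r + (2 : Int) ^ bit else r) _ ?_]
  · exact pv_intFold _ _ 0
  · intro acc bit _
    rw [PySem.List.pyRange_zero_nat, List.filter_map]
    simp only [Function.comp_def, pv_band_pow, List.map_map]
    rw [pv_hcie, List.count_eq_countP, List.countP_map, List.countP_filter]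
    unfold pvOddBit
    simp [PySem.List.pyGetD_natCast]

lemma pv_B_eq (board : List Bool) :
    decide_n_by_n_board_alt_alt board
      = (((2 ^ (PySem.Int.bitLength ((board.length : Int) - 1)) - 1) ^^^ pvNatX board : Nat) : Int) := by
  unfold decide_n_by_n_board_alt_alt pvNatX
  rw [PySem.List.enumerate_eq_map_pyRange board false]
  simp only [PySem.List.len_eq, PySem.List.pyRange_zero_nat, List.map_map, List.foldl_map,
    Function.comp_def, PySem.List.pyGetD_natCast]
  rw [show (0 : Int) = ((0 : Nat) : Int) from rfl, pv_intXFold _ _ 0]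
  rw [show ((2 : Int) ^ (PySem.Int.bitLength ((board.length : Int) - 1)) - 1)
      = (((2 ^ (PySem.Int.bitLength ((board.length : Int) - 1)) - 1 : Nat)) : Int) by
    push_cast [Nat.one_le_two_pow]; ring]
  rw [PySem.Int.bxor_natCast]

-- ===== VERDICT (by name: the statement is the Claim_ definition above) =====
theorem decide_n_by_n_board_alt_spec : Claim_equal_decide_n_by_n_board_alt := by
  intro board _
  unfold Spec_decide_n_by_n_board_alt
  rw [pv_A_eq, pv_B_eq]
  congr 1
  apply Nat.eq_of_testBit_eq
  intro j
  rw [pv_natA_testBit, Nat.testBit_xor, Nat.testBit_two_pow_sub_one, pv_natX_testBit]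
  by_cases hj : j < PySem.Int.bitLength ((board.length : Int) - 1)
  · simp [hj]
  · have hodd : pvOddBit board j = false :=
      pv_oddBit_high board j (le_trans (pv_len_le board)
        (Nat.pow_le_pow_right (by norm_num) (le_of_not_gt hj)))
    simp [hj, hodd]
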